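-- pv_equiv track=rewrite | github.com/mentum/challenges | fat-flatifier/osylvain_python/fatflat.py | fat_flatify
-- ===== SOURCE A (Python) =====
-- import math
--
-- FAT = 'fat'
--
-- FLAT = 'flat'
--
-- def fat_flatify(n, k):
--     if n < 1:
--         return []
--
--     number_of_fats = math.floor(n/2)
--     number_of_flats = n - number_of_fats
--     maximum_reachable_k = number_of_fats * number_of_flats
--
--     if k > maximum_reachable_k:
--         return []
--
--     number_of_starting_fats = int(math.floor(k / number_of_flats))
--     remaining_flats_to_pair = int(k % number_of_flats)
--     trailing_fats = number_of_fats - number_of_starting_fats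
--
--     fat_flats = [FAT for i in range(number_of_starting_fats)]
--     fat_flats.extend([FLAT for i in range((number_of_flats - remaining_flats_to_pair))])
--     if remaining_flats_to_pair > 0:
--         fat_flats.append(FAT)
--         trailing_fats -= 1
--         fat_flats.extend([FLAT for i in range(remaining_flats_to_pair)])
--     fat_flats.extend([FAT for i in range(trailing_fats)])
--
--     return fat_flats
-- ===== SOURCE B (Python) =====
-- FAT = 'fat'
--
-- FLAT = 'flat'
--
-- def fat_flatify(n, k):
--     if n < 1:
--         return []
--     fats = n // 2
--     flats = n - fats
--     if k < 0 or k > fats * flats: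
--         return []
--     s, r = divmod(k, flats)
--     # flats remaining to the right of each fat, in order
--     v = [flats] * s + ([r] if r > 0 else []) + [0] * (fats - s - (1 if r > 0 else 0))
--     out = [FLAT] * (flats - (v[0] if v else 0))
--     for cur, nxt in zip(v, v[1:] + [0]):
--         out.append(FAT)
--         out += [FLAT] * (cur - nxt)
--     return out
-- ===== Notes on version B (the rewrite author's own statement) =====
-- stated objective: alternative
-- what changed: A appends four fixed blocks (starting fats, flats, optional fat+paired flats, trailing fats); B builds a per-fat flats-remaining vector and emits the list with one loop over the fats, one FAT plus the drop in remaining flats at each step.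
-- intended difference: On n >= 1 with k < 0, A returns a malformed arrangement longer than n fruits (its starting-fats count floors negative while its trailing-fats count grows by the same amount); B treats a negative inversion count like an unreachable one and returns [], the intended value. — e.g. on fat_flatify(2, -1): A returns ["flat", "fat", "fat"], B returns []
import Mathlib
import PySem

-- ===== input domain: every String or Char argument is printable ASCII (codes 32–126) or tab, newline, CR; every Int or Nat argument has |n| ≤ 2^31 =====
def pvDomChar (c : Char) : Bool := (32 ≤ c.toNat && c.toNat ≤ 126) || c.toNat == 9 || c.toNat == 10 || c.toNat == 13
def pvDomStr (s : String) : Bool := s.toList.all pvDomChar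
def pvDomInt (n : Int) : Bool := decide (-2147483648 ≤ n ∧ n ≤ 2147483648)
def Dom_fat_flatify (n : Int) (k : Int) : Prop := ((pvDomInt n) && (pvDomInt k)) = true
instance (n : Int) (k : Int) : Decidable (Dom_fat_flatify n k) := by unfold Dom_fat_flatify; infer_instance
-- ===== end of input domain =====

-- B replaces A's four fixed block appends by a per-fat emission loop over a flats-remaining
-- vector (alternative decomposition); on n ≥ 1 with negative k, B returns [] where A returns a
-- malformed list (stated as the intended difference D_ below).

-- ===== PORT A =====
-- math.floor(n/2) and int(math.floor(k/flats)) divide floats in Python; on Dom (|n|,|k| ≤ 2^31)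
-- the float quotient floors to the exact integer floor, so both are ported as integer floor division.
def fat_flatify (n : Int) (k : Int) : List String :=
  if n < 1 then [] else
  let number_of_fats := PySem.Int.floordiv n 2
  let number_of_flats := n - number_of_fats
  let maximum_reachable_k := number_of_fats * number_of_flats
  if k > maximum_reachable_k then [] else
  let number_of_starting_fats := PySem.Int.floordiv k number_of_flats
  let remaining_flats_to_pair := PySem.Int.mod k number_of_flats
  let trailing_fats := number_of_fats - number_of_starting_fats
  let fat_flats := (PySem.List.pyRange 0 number_of_starting_fats 1).map (fun _ => "fat")
  let fat_flats := fat_flats ++ (PySem.List.pyRange 0 (number_of_flats - remaining_flats_to_pair) 1).map (fun _ => "flat")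
  if remaining_flats_to_pair > 0 then
    ((fat_flats ++ ["fat"]) ++ (PySem.List.pyRange 0 remaining_flats_to_pair 1).map (fun _ => "flat"))
      ++ (PySem.List.pyRange 0 (trailing_fats - 1) 1).map (fun _ => "fat")
  else
    fat_flats ++ (PySem.List.pyRange 0 trailing_fats 1).map (fun _ => "fat")

def fat_flatify_alt (n : Int) (k : Int) : List String :=
  if n < 1 then [] else
  let fats := PySem.Int.floordiv n 2
  let flats := n - fats
  if k < 0 ∨ k > fats * flats then [] else
  let s := PySem.Int.floordiv k flats
  let r := PySem.Int.mod k flats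
  let v : List Int := (PySem.List.pyRepeat [flats] s ++ (if r > 0 then [r] else [])) ++
      PySem.List.pyRepeat [0] (fats - s - (if r > 0 then 1 else 0))
  let out := PySem.List.pyRepeat ["flat"] (flats - v.headD 0)
  (v.zip (v.drop 1 ++ [0])).foldl
    (fun out p => (out ++ ["fat"]) ++ PySem.List.pyRepeat ["flat"] (p.1 - p.2)) out


-- ===== PRECONDITION & SPEC =====
-- On inputs with n ≥ 1 and k < 0, A returns a malformed arrangement longer than n fruits (its
-- starting-fats count floors negative while its trailing-fats count grows by the same amount);
-- B treats a negative inversion count like an unreachable one and returns [], the intended value.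
def D_fat_flatify (n : Int) (k : Int) : Prop := 1 ≤ n ∧ k < 0
instance (n : Int) (k : Int) : Decidable (D_fat_flatify n k) := by unfold D_fat_flatify; infer_instance
def Spec_fat_flatify (n : Int) (k : Int) (out : List String) : Prop := ¬ D_fat_flatify n k → out = fat_flatify_alt n k
instance (n : Int) (k : Int) (out : List String) : Decidable (Spec_fat_flatify n k out) := by unfold Spec_fat_flatify; infer_instance
def pvDiffWitness_fat_flatify : Int × Int := (2, -1)
def pvDiffWitnessOut_fat_flatify : (List String) × (List String) := (["flat", "fat", "fat"], [])

-- ===== CLAIM (what is proved, stated in full; the proofs are below) =====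
def Claim_unchanged_fat_flatify : Prop := ∀ (n : Int) (k : Int), Dom_fat_flatify n k → Spec_fat_flatify n k (fat_flatify n k)
def Claim_changed_fat_flatify : Prop := Dom_fat_flatify (pvDiffWitness_fat_flatify.1) (pvDiffWitness_fat_flatify.2) ∧ D_fat_flatify (pvDiffWitness_fat_flatify.1) (pvDiffWitness_fat_flatify.2) ∧ fat_flatify (pvDiffWitness_fat_flatify.1) (pvDiffWitness_fat_flatify.2) = pvDiffWitnessOut_fat_flatify.1 ∧ fat_flatify_alt (pvDiffWitness_fat_flatify.1) (pvDiffWitness_fat_flatify.2) = pvDiffWitnessOut_fat_flatify.2 ∧ pvDiffWitnessOut_fat_flatify.1 ≠ pvDiffWitnessOut_fat_flatify.2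
def Claim_exact_fat_flatify : Prop := ∀ (n : Int) (k : Int), Dom_fat_flatify n k → D_fat_flatify n k → fat_flatify n k ≠ fat_flatify_alt n k

-- ===== LEMMAS AND PROOFS =====

theorem pv_map_const_pyRange (m : Int) (c : String) :
    (PySem.List.pyRange 0 m 1).map (fun _ => c) = List.replicate m.toNat c := by
  rw [PySem.List.pyRange_one]
  rw [List.map_map]
  have h : ((fun _ => c) ∘ fun k : Nat => (0 : Int) + ↑k) = fun _ : Nat => c := rfl
  rw [h, List.map_const', List.length_range]
  norm_num

def pvE (v : List Int) : List String :=
  (v.zip (v.drop 1 ++ [0])).flatMap (fun p => "fat" :: List.replicate (p.1 - p.2).toNat "flat")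

theorem pv_fold_emit (v : List Int) (init : List String) :
    (v.zip (v.drop 1 ++ [0])).foldl
      (fun out p => (out ++ ["fat"]) ++ PySem.List.pyRepeat ["flat"] (p.1 - p.2)) init
      = init ++ pvE v := by
  unfold pvE
  generalize v.zip (v.drop 1 ++ [0]) = l
  induction l generalizing init with
  | nil => simp
  | cons p t ih =>
    rw [List.foldl_cons, ih, List.flatMap_cons]
    simp [PySem.List.pyRepeat_singleton]

theorem pvE_cons (c : Int) (v : List Int) :
    pvE (c :: v) = ("fat" :: List.replicate (c - v.headD 0).toNat "flat") ++ pvE v := by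
  cases v <;> simp [pvE]

theorem pv_headD_rep_zero (i : Nat) : (List.replicate i (0:Int)).headD 0 = 0 := by
  cases i <;> simp [List.replicate_succ]

theorem pv_getD_rep_zero (i : Nat) : (List.replicate i (0:Int)).head?.getD 0 = 0 := by
  cases i <;> simp [List.replicate_succ]

theorem pv_headD_rep_cons (i : Nat) (c : Int) (t : List Int) :
    (List.replicate (i+1) c ++ t).headD 0 = c := by simp [List.replicate_succ]

theorem pvE_rep_zero (m : Nat) : pvE (List.replicate m (0:Int)) = List.replicate m "fat" := by
  induction m with
  | zero => rfl
  | succ i ih =>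
    rw [List.replicate_succ, pvE_cons, ih]
    simp [pv_getD_rep_zero, List.replicate_succ]

theorem pvE_rep_pref (m : Nat) (c w : Int) (t : List Int) :
    pvE (List.replicate (m+1) c ++ (w :: t))
      = List.replicate m "fat" ++ (("fat" :: List.replicate (c - w).toNat "flat") ++ pvE (w :: t)) := by
  induction m with
  | zero => simp [pvE_cons]
  | succ i ih =>
    rw [List.replicate_succ, List.cons_append, pvE_cons, ih]
    simp [List.replicate_succ]

theorem pvE_rep_only (m : Nat) (c : Int) :
    pvE (List.replicate (m+1) c)
      = List.replicate m "fat" ++ ("fat" :: List.replicate c.toNat "flat") := by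
  induction m with
  | zero => simp [pvE]
  | succ i ih =>
    rw [List.replicate_succ, pvE_cons, ih]
    simp [List.replicate_succ]

theorem pvE_repc_zeros (m T : Nat) (c : Int) :
    pvE (List.replicate (m+1) c ++ List.replicate T 0)
      = List.replicate m "fat" ++ (("fat" :: List.replicate c.toNat "flat") ++ List.replicate T "fat") := by
  cases T with
  | zero => simp [pvE_rep_only]
  | succ j =>
    rw [List.replicate_succ (n := j), pvE_rep_pref, pvE_cons, pvE_rep_zero]
    simp [pv_getD_rep_zero, List.replicate_succ]

theorem pv_main (n k : Int) (hnd : ¬ (1 ≤ n ∧ k < 0)) :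
    fat_flatify n k = fat_flatify_alt n k := by
  by_cases hn : n < 1
  · simp [fat_flatify, fat_flatify_alt, hn]
  · have hn1 : 1 ≤ n := by omega
    have hkk : 0 ≤ k := by by_contra h; exact hnd ⟨hn1, by omega⟩
    have hF0 : 0 ≤ PySem.Int.floordiv n 2 := by
      rw [PySem.Int.floordiv_eq_ediv_of_pos (by norm_num)]; omega
    obtain ⟨F, hF⟩ : ∃ F : Nat, PySem.Int.floordiv n 2 = (F:Int) :=
      ⟨_, (Int.toNat_of_nonneg hF0).symm⟩
    have hFed : (F:Int) = n / 2 := by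
      rw [← hF, PySem.Int.floordiv_eq_ediv_of_pos (by norm_num)]
    obtain ⟨L, hL⟩ : ∃ L : Nat, n - (F:Int) = (L:Int) := ⟨(n - F).toNat, by omega⟩
    have hL1 : 1 ≤ L := by omega
    simp only [fat_flatify, fat_flatify_alt, if_neg hn, hF, hL]
    by_cases hkmax : k > (F:Int) * (L:Int)
    · simp [hkmax]
    · have hor : ¬ (k < 0 ∨ k > (F:Int) * (L:Int)) := by omega
      simp only [if_neg hkmax, if_neg hor]
      have hLpos : (0:Int) < (L:Int) := by omega
      have hs0 : 0 ≤ PySem.Int.floordiv k (L:Int) :=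
        (PySem.Int.le_floordiv_iff_mul_le (a := k) (q := 0) hLpos).2 (by omega)
      obtain ⟨S, hS⟩ : ∃ S : Nat, PySem.Int.floordiv k (L:Int) = (S:Int) :=
        ⟨_, (Int.toNat_of_nonneg hs0).symm⟩
      obtain ⟨R, hR⟩ : ∃ R : Nat, PySem.Int.mod k (L:Int) = (R:Int) :=
        ⟨_, (Int.toNat_of_nonneg (PySem.Int.mod_nonneg k hLpos)).symm⟩
      have hRL : (R:Int) < (L:Int) := hR ▸ PySem.Int.mod_lt k hLpos
      have hkeq : (S:Int) * (L:Int) + (R:Int) = k := by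
        rw [← hS, ← hR]; exact PySem.Int.floordiv_mul_add_mod k (L:Int)
      have hkmax' : k ≤ (F:Int) * (L:Int) := by omega
      have hSF : S ≤ F := by
        have h1 : (S:Int) * (L:Int) ≤ (F:Int) * (L:Int) := by
          have : 0 ≤ (R:Int) := by positivity
          linarith
        exact_mod_cast le_of_mul_le_mul_right (by exact_mod_cast h1) (by omega : 0 < L)
      have hedge : S = F → R = 0 := by
        intro h; subst h
        have : (R:Int) = 0 := by linarith
        exact_mod_cast this
      rw [hS, hR, pv_fold_emit]
      simp only [pv_map_const_pyRange, PySem.List.pyRepeat_singleton, Int.toNat_natCast]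
      by_cases hrp : (R:Int) > 0
      · have hR1 : 1 ≤ R := by exact_mod_cast hrp
        have hSltF : S < F := by
          rcases Nat.lt_or_ge S F with h | h
          · exact h
          · exfalso; have := hedge (le_antisymm hSF h); omega
        simp only [if_pos hrp]
        have e2 : ((L:Int) - (R:Int)).toNat = L - R := by omega
        have e4 : ((F:Int) - (S:Int) - 1).toNat = F - S - 1 := by omega
        rw [e2, e4]
        cases S with
        | zero =>
          have hv : (List.replicate 0 ((L:Int)) ++ [(R:Int)]) ++ List.replicate (F - 0 - 1) (0:Int)
              = (R:Int) :: List.replicate (F - 0 - 1) (0:Int) := by simp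
          rw [hv, pvE_cons, pvE_rep_zero, List.headD_cons, pv_headD_rep_zero, e2]
          simp [List.append_assoc]
        | succ S' =>
          have hv : (List.replicate (S'+1) ((L:Int)) ++ [(R:Int)]) ++ List.replicate (F - (S'+1) - 1) (0:Int)
              = List.replicate (S'+1) ((L:Int)) ++ ((R:Int) :: List.replicate (F - (S'+1) - 1) (0:Int)) := by
            simp
          rw [hv, pvE_rep_pref, pvE_cons, pvE_rep_zero, pv_headD_rep_cons,
            pv_headD_rep_zero, e2]
          simp [List.replicate_succ', List.append_assoc]
      · simp only [if_neg hrp, List.append_nil]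
        have hR0 : R = 0 := by omega
        subst hR0
        simp only [Nat.cast_zero, Int.sub_zero]
        have e3 : ((F:Int) - (S:Int)).toNat = F - S := by omega
        rw [e3, Int.toNat_natCast]
        cases S with
        | zero =>
          have hv : List.replicate 0 ((L:Int)) ++ List.replicate (F - 0) (0:Int)
              = List.replicate (F - 0) (0:Int) := by simp
          rw [hv, pvE_rep_zero, pv_headD_rep_zero]
          simp
        | succ S' =>
          rw [pvE_repc_zeros, pv_headD_rep_cons]
          simp [List.replicate_succ', List.append_assoc]

theorem pv_tight (n k : Int) (h1 : 1 ≤ n) (hk : k < 0) :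
    fat_flatify n k ≠ fat_flatify_alt n k := by
  have hn : ¬ n < 1 := by omega
  have hFed : PySem.Int.floordiv n 2 = n / 2 :=
    PySem.Int.floordiv_eq_ediv_of_pos (by norm_num)
  have hF0 : 0 ≤ PySem.Int.floordiv n 2 := by omega
  have hfl : 1 ≤ n - PySem.Int.floordiv n 2 := by omega
  have hmax : 0 ≤ PySem.Int.floordiv n 2 * (n - PySem.Int.floordiv n 2) :=
    mul_nonneg hF0 (by omega)
  have hkmax : ¬ k > PySem.Int.floordiv n 2 * (n - PySem.Int.floordiv n 2) := by omega
  have hrlt : PySem.Int.mod k (n - n / 2) < n - n / 2 := PySem.Int.mod_lt k (by omega)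
  simp only [fat_flatify, fat_flatify_alt, if_neg hn, if_neg hkmax, if_pos (Or.inl hk),
    pv_map_const_pyRange]
  intro heq
  by_cases hrp : PySem.Int.mod k (n - PySem.Int.floordiv n 2) > 0
  · rw [if_pos hrp] at heq
    simp [List.append_eq_nil_iff] at heq
  · rw [if_neg hrp] at heq
    simp [List.append_eq_nil_iff] at heq
    omega

-- ===== VERDICT (by name: the statement is the Claim_ definition above) =====
theorem fat_flatify_spec : Claim_unchanged_fat_flatify := by
  intro n k _ hnd
  exact pv_main n k hnd

theorem fat_flatify_changed : Claim_changed_fat_flatify := by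
  unfold Claim_changed_fat_flatify; decide

theorem fat_flatify_tight : Claim_exact_fat_flatify := by
  intro n k _ hd
  unfold D_fat_flatify at hd
  exact pv_tight n k hd.1 hd.2
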